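-- pv_equiv track=rewrite | github.com/edoriggio/algorithms-and-data-structures | exercises/high_power_run.py | high_power_run
-- ===== SOURCE A (Python) =====
-- def high_power_run(A, h, t):
--     for i in range(len(A) - 1):
--         curr_gain = 0
--         max_sec = i + t
--
--         if i + (t + 1) >= len(A):
--             max_sec = len(A) - 1
--
--         for j in range(i + 1, max_sec + 1):
--             if A[j] > A[j - 1]:
--                 diff = A[j] - A[j - 1]
--                 curr_gain += diff
--
--         if curr_gain >= h:
--             return True
--
--     return False
-- ===== SOURCE B (Python) =====
-- def high_power_run(A, h, t):
--     n = len(A)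
--     P = [0]
--     for j in range(1, n):
--         d = A[j] - A[j - 1]
--         P.append(P[-1] + (d if d > 0 else 0))
--     for i in range(n - 1):
--         m = min(i + t, n - 1)
--         if m < i:
--             m = i
--         if P[m] - P[i] >= h:
--             return True
--     return False
-- ===== Notes on version B (the rewrite author's own statement) =====
-- stated objective: faster
-- what changed: B precomputes one prefix-sum array of positive adjacent gains and answers each window in O(1), instead of A's rescan of every length-t window.
import Mathlib
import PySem

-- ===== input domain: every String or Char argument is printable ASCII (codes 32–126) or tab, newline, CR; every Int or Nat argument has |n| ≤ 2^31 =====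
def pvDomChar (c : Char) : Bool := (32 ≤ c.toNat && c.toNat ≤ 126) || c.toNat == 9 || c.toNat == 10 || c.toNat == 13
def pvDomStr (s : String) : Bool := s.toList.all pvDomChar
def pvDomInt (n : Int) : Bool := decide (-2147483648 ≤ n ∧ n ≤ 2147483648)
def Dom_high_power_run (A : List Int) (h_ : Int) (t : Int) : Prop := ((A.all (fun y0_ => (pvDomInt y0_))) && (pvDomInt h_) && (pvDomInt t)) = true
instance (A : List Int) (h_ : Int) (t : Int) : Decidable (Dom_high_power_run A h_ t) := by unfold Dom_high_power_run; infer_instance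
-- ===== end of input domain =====

-- B replaces A's O(n·t) per-window rescans by one prefix-sum array of positive
-- gains with O(1) window queries — objective: faster (asymptotic, O(n·t) → O(n)).

-- ===== PORT A =====
-- inner loop of A: for j in range(i+1, max_sec+1): if A[j] > A[j-1]: curr_gain += A[j]-A[j-1]
-- (indices j, j-1 are always in range on these loop bounds, so pyGetD is exact here)
def hprA_gain (A : List Int) (i maxSec : Int) : Int :=
  (PySem.List.pyRange (i + 1) (maxSec + 1) 1).foldl
    (fun curr j =>
      if PySem.List.pyGetD A j 0 > PySem.List.pyGetD A (j - 1) 0 then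
        curr + (PySem.List.pyGetD A j 0 - PySem.List.pyGetD A (j - 1) 0)
      else curr) 0

-- outer loop of A with its early return
def hprA_loop (A : List Int) (h_ t : Int) : List Int → Bool
  | [] => false
  | i :: rest =>
      let maxSec := if i + (t + 1) ≥ (A.length : Int) then (A.length : Int) - 1 else i + t
      if hprA_gain A i maxSec ≥ h_ then true else hprA_loop A h_ t rest

def high_power_run (A : List Int) (h_ : Int) (t : Int) : Bool :=
  hprA_loop A h_ t (PySem.List.pyRange 0 ((A.length : Int) - 1) 1)

-- ===== PORT B =====
-- P = [0]; for j in range(1, n): P.append(P[-1] + (d if d > 0 else 0))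
def hprB_P (A : List Int) : List Int :=
  (PySem.List.pyRange 1 (A.length : Int) 1).foldl
    (fun P j =>
      let d := PySem.List.pyGetD A j 0 - PySem.List.pyGetD A (j - 1) 0
      P ++ [PySem.List.pyGetD P (-1) 0 + (if d > 0 then d else 0)]) [0]

-- for i in range(n-1): m = min(i+t, n-1); if m < i: m = i; if P[m]-P[i] >= h: return True
def hprB_loop (P : List Int) (n h_ t : Int) : List Int → Bool
  | [] => false
  | i :: rest =>
      let m0 := min (i + t) (n - 1)
      let m := if m0 < i then i else m0
      if PySem.List.pyGetD P m 0 - PySem.List.pyGetD P i 0 ≥ h_ then true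
      else hprB_loop P n h_ t rest

def high_power_run_alt (A : List Int) (h_ : Int) (t : Int) : Bool :=
  let P := hprB_P A
  hprB_loop P (A.length : Int) h_ t (PySem.List.pyRange 0 ((A.length : Int) - 1) 1)

-- ===== PRECONDITION & SPEC =====
def Spec_high_power_run (A : List Int) (h_ : Int) (t : Int) (out : Bool) : Prop := out = high_power_run_alt A h_ t
instance (A : List Int) (h_ : Int) (t : Int) (out : Bool) : Decidable (Spec_high_power_run A h_ t out) := by unfold Spec_high_power_run; infer_instance

-- ===== CLAIM (what is proved, stated in full; the proofs are below) =====
def Claim_equal_high_power_run : Prop := ∀ (A : List Int) (h_ : Int) (t : Int), Dom_high_power_run A h_ t → Spec_high_power_run A h_ t (high_power_run A h_ t)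

-- ===== LEMMAS AND PROOFS =====

-- positive-diff gain at step j (the common summand of both programs)
def hprG (A : List Int) (j : Int) : Int :=
  let d := PySem.List.pyGetD A j 0 - PySem.List.pyGetD A (j - 1) 0
  if d > 0 then d else 0

-- mathematical prefix sums of hprG
def hprS (A : List Int) : Nat → Int
  | 0 => 0
  | k + 1 => hprS A k + hprG A ((k : Int) + 1)

lemma hprA_gain_fold (A : List Int) (l : List Int) (c : Int) :
    l.foldl (fun curr j =>
      if PySem.List.pyGetD A j 0 > PySem.List.pyGetD A (j - 1) 0 then
        curr + (PySem.List.pyGetD A j 0 - PySem.List.pyGetD A (j - 1) 0)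
      else curr) c = c + (l.map (hprG A)).sum := by
  induction l generalizing c with
  | nil => simp
  | cons x xs ih =>
      simp only [List.foldl_cons, List.map_cons, List.sum_cons, ih, hprG]
      split_ifs with h1 <;> omega

lemma hprA_gain_eq_sum (A : List Int) (i m : Int) :
    hprA_gain A i m = ((PySem.List.pyRange (i + 1) (m + 1) 1).map (hprG A)).sum := by
  simpa using hprA_gain_fold A (PySem.List.pyRange (i + 1) (m + 1) 1) 0

lemma hprS_sub (A : List Int) (a b : Nat) (hab : a ≤ b) :
    hprS A b = hprS A a + ((PySem.List.pyRange ((a : Int) + 1) ((b : Int) + 1) 1).map (hprG A)).sum := by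
  induction b with
  | zero =>
      have : a = 0 := Nat.le_zero.mp hab
      subst this
      simp [PySem.List.pyRange_one_eq_nil]
  | succ b ih =>
      rcases Nat.lt_or_ge a (b + 1) with h | h
      · have hab' : a ≤ b := Nat.lt_succ_iff.mp h
        have := ih hab'
        rw [show ((b + 1 : Nat) : Int) + 1 = ((b : Int) + 1) + 1 by push_cast; ring,
            PySem.List.pyRange_one_succ_right (by omega : (a : Int) + 1 ≤ (b : Int) + 1)]
        simp only [hprS, List.map_append, List.sum_append, List.map_cons, List.map_nil,
          List.sum_cons, List.sum_nil]
        omega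
      · have : a = b + 1 := le_antisymm hab h
        subst this
        simp [PySem.List.pyRange_one_eq_nil]

-- characterisation of B's prefix list
lemma hprB_P_eq (A : List Int) (c : Nat) (hc : 1 ≤ c) :
    (PySem.List.pyRange 1 (c : Int) 1).foldl
      (fun P j =>
        let d := PySem.List.pyGetD A j 0 - PySem.List.pyGetD A (j - 1) 0
        P ++ [PySem.List.pyGetD P (-1) 0 + (if d > 0 then d else 0)]) [0]
      = (List.range c).map (hprS A) := by
  induction c with
  | zero => omega
  | succ c ih =>
      rcases Nat.lt_or_ge c 1 with h | h
      · have : c = 0 := by omega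
        subst this
        simp [PySem.List.pyRange_one_eq_nil, hprS]
      · have hrange : PySem.List.pyRange 1 ((c + 1 : Nat) : Int) 1
            = PySem.List.pyRange 1 (c : Int) 1 ++ [(c : Int)] := by
          rw [show ((c + 1 : Nat) : Int) = (c : Int) + 1 by push_cast; ring]
          exact PySem.List.pyRange_one_succ_right (by exact_mod_cast h)
        rw [hrange, List.foldl_append, ih h]
        simp only [List.foldl_cons, List.foldl_nil]
        have hne : (List.range c).map (hprS A) ≠ [] := by
          simp [List.map_eq_nil_iff, List.range_eq_nil]; omega
        rw [PySem.List.pyGetD_neg_one _ _ hne]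
        have hlast : ((List.range c).map (hprS A)).getLast hne = hprS A (c - 1) := by
          rw [List.getLast_eq_getElem]
          simp only [List.length_map, List.length_range]
          rw [List.getElem_map, List.getElem_range]
        rw [hlast]
        have hstep : hprS A c = hprS A (c - 1) + hprG A ((c : Int)) := by
          conv_lhs => rw [show c = (c - 1) + 1 by omega]
          rw [hprS]
          congr 2
          omega
        rw [List.range_succ, List.map_append]
        simp only [List.map_cons, List.map_nil, List.append_cancel_left_eq]
        rw [hstep]
        congr 1

lemma hprB_P_char (A : List Int) (h1 : 1 ≤ A.length) :
    hprB_P A = (List.range A.length).map (hprS A) := by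
  unfold hprB_P
  exact hprB_P_eq A A.length h1

lemma pyGetD_P (A : List Int) (h1 : 1 ≤ A.length) (k : Int)
    (h0 : 0 ≤ k) (hk : k < (A.length : Int)) :
    PySem.List.pyGetD (hprB_P A) k 0 = hprS A k.toNat := by
  rw [hprB_P_char A h1]
  rw [PySem.List.pyGetD_eq_getElem _ _ h0 (by simpa using hk)]
  simp only [List.getElem_map, List.getElem_range]

-- per-index agreement of the two loop bodies' tested quantities
lemma body_eq (A : List Int) (t i : Int) (h0 : 0 ≤ i) (hi : i < (A.length : Int) - 1) :
    hprA_gain A i (if i + (t + 1) ≥ (A.length : Int) then (A.length : Int) - 1 else i + t)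
      = PySem.List.pyGetD (hprB_P A)
          (if min (i + t) ((A.length : Int) - 1) < i then i else min (i + t) ((A.length : Int) - 1)) 0
        - PySem.List.pyGetD (hprB_P A) i 0 := by
  have hn : 1 ≤ A.length := by omega
  set n : Int := (A.length : Int) with hn'
  have hmaxSec : (if i + (t + 1) ≥ n then n - 1 else i + t) = min (i + t) (n - 1) := by
    split_ifs with h <;> omega
  rw [hmaxSec]
  set ms := min (i + t) (n - 1) with hms
  have hPi : PySem.List.pyGetD (hprB_P A) i 0 = hprS A i.toNat :=
    pyGetD_P A hn i h0 (by omega)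
  rcases lt_or_ge ms i with hlt | hge
  · -- empty window: gain 0, m = i
    rw [if_pos hlt, hprA_gain_eq_sum,
        PySem.List.pyRange_one_eq_nil (by omega : ms + 1 ≤ i + 1)]
    simp
  · rw [if_neg (not_lt.mpr hge), hprA_gain_eq_sum]
    have hPm : PySem.List.pyGetD (hprB_P A) ms 0 = hprS A ms.toNat :=
      pyGetD_P A hn ms (by omega) (by omega)
    rw [hPi, hPm]
    have hcast_i : ((i.toNat : Int)) = i := Int.toNat_of_nonneg h0
    have hcast_m : ((ms.toNat : Int)) = ms := Int.toNat_of_nonneg (by omega)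
    have := hprS_sub A i.toNat ms.toNat (by omega)
    rw [hcast_i, hcast_m] at this
    omega

lemma loops_eq (A : List Int) (h_ t : Int) (l : List Int)
    (hl : ∀ i ∈ l, 0 ≤ i ∧ i < (A.length : Int) - 1) :
    hprA_loop A h_ t l = hprB_loop (hprB_P A) (A.length : Int) h_ t l := by
  induction l with
  | nil => rfl
  | cons i rest ih =>
      have hi := hl i (List.mem_cons_self)
      simp only [hprA_loop, hprB_loop]
      rw [body_eq A t i hi.1 hi.2]
      split_ifs
      all_goals first
        | rfl
        | exact ih (fun j hj => hl j (List.mem_cons_of_mem _ hj))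

-- ===== VERDICT (by name: the statement is the Claim_ definition above) =====
theorem high_power_run_spec : Claim_equal_high_power_run := by
  intro A h_ t _
  unfold Spec_high_power_run high_power_run high_power_run_alt
  exact loops_eq A h_ t _ (fun i hi => by
    have := (PySem.List.mem_pyRange_one).mp hi
    omega)
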